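-- pv_equiv track=rewrite | github.com/Arsen1302/Code-copy-detector | TestData/solutions/problem_1287_5.py | solution_1287_5
-- ===== SOURCE A (Python) =====
-- def solution_1287_5(s: str) -> int:
--     ret = len(s)
--     onesOdd = 0
--     onesEven = 0
--     for i, digit in enumerate(s):
--         if i % 2 == 0 and digit == "1":
--             onesEven += 1
--         elif i % 2 == 1 and digit == "1":
--             onesOdd += 1
--
--     total = onesEven + onesOdd
--     for i in range(len(s)):
--
--         #target: 010101...
--         flips = onesEven + (len(s)//2 - onesOdd)
--         ret = min(ret, flips)
--
--         #target: 101010...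
--         flips = (len(s)-len(s)//2 - onesEven) + onesOdd
--         ret = min(ret, flips)
--
--         if len(s) % 2 == 0:
--             break
--         else:
--             onesEven = onesOdd + (1 if s[i] == "1" else 0)
--             onesOdd = total - onesEven
--     return ret
-- ===== SOURCE B (Python) =====
-- def solution_1287_5(s: str) -> int:
--     n = len(s)
--     ret = n
--     rotations = range(n) if n % 2 == 1 else range(min(n, 1))
--     for r in rotations:
--         flips = 0
--         for i in range(n):
--             if (s[(i + r) % n] == "1") != (i % 2 == 1):
--                 flips += 1
--         ret = min(ret, flips, n - flips)
--     return ret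
-- ===== Notes on version B (the rewrite author's own statement) =====
-- stated objective: alternative
-- what changed: B recomputes each rotation's flip count by a direct per-rotation mismatch scan of the whole string against the alternating target (evaluating only rotation 0 when the length is even), replacing A's incrementally maintained even/odd ones-counters that are updated as the rotation window slides.
import Mathlib
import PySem

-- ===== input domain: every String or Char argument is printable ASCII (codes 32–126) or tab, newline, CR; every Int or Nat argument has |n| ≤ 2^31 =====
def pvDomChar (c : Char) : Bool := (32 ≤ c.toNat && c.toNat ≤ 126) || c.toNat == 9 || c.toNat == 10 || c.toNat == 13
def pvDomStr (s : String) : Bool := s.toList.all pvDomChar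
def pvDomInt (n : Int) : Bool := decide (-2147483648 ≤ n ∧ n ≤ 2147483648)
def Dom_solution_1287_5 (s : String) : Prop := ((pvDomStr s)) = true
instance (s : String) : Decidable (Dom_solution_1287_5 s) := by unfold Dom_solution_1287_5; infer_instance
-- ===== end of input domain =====

-- B derives each rotation's flip count by a direct per-rotation mismatch scan of the string
-- instead of A's incrementally maintained parity counters (objective: alternative, not faster).

-- ===== PORT A =====
-- the 'for i in range(len(s))' loop with its early 'break' (taken when len(s) % 2 == 0), as structural recursion
def solutionALoop (cs : List Char) (n total : Int) : List Int → Int → Int → Int → Int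
  | [], ret, _, _ => ret
  | i :: rest, ret, onesEven, onesOdd =>
    let flips1 := onesEven + (PySem.Int.floordiv n 2 - onesOdd)
    let ret1 := min ret flips1
    let flips2 := (n - PySem.Int.floordiv n 2 - onesEven) + onesOdd
    let ret2 := min ret1 flips2
    if PySem.Int.mod n 2 = 0 then ret2
    else
      let oe := onesOdd + (if PySem.List.pyGetD cs i ' ' = '1' then 1 else 0)
      solutionALoop cs n total rest ret2 oe (total - oe)

def solution_1287_5 (s : String) : Int :=
  let cs := s.toList
  -- st.1 = onesEven, st.2 = onesOdd
  let st := (PySem.List.enumerate cs 0).foldl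
    (fun (st : Int × Int) (p : Int × Char) =>
      if PySem.Int.mod p.1 2 = 0 ∧ p.2 = '1' then (st.1 + 1, st.2)
      else if PySem.Int.mod p.1 2 = 1 ∧ p.2 = '1' then (st.1, st.2 + 1)
      else st) (0, 0)
  let total := st.1 + st.2
  solutionALoop cs (PySem.Str.len s) total (PySem.List.pyRange 0 (PySem.Str.len s) 1)
    (PySem.Str.len s) st.1 st.2

-- ===== PORT B =====
-- the inner 'for i in range(n)' mismatch scan of Source B
def solutionBFlips (cs : List Char) (n r : Int) : Int :=
  (PySem.List.pyRange 0 n 1).foldl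
    (fun f i =>
      if decide (PySem.List.pyGetD cs (PySem.Int.mod (i + r) n) ' ' = '1')
           != decide (PySem.Int.mod i 2 = 1) then f + 1 else f) 0

def solution_1287_5_alt (s : String) : Int :=
  let cs := s.toList
  let n : Int := PySem.Str.len s
  let rots := if PySem.Int.mod n 2 = 1 then PySem.List.pyRange 0 n 1
              else PySem.List.pyRange 0 (min n 1) 1
  rots.foldl (fun ret r =>
    let flips := solutionBFlips cs n r
    min (min ret flips) (n - flips)) n

-- ===== PRECONDITION & SPEC =====
def Spec_solution_1287_5 (s : String) (out : Int) : Prop := out = solution_1287_5_alt s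
instance (s : String) (out : Int) : Decidable (Spec_solution_1287_5 s out) := by unfold Spec_solution_1287_5; infer_instance

-- ===== CLAIM (what is proved, stated in full; the proofs are below) =====
def Claim_equal_solution_1287_5 : Prop := ∀ (s : String), Dom_solution_1287_5 s → Spec_solution_1287_5 s (solution_1287_5 s)

-- ===== LEMMAS AND PROOFS =====

/-- `1` if the character is `'1'`, else `0`. -/
def pvOnes (c : Char) : Int := if c = '1' then 1 else 0

/-- `pvCnt true` counts `'1'`s at even indices, `pvCnt false` at odd indices. -/
def pvCnt : Bool → List Char → Int
  | _, [] => 0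
  | b, c :: cs => (if b then pvOnes c else 0) + pvCnt (!b) cs

/-- total number of `'1'`s -/
def pvTot (cs : List Char) : Int := (cs.map pvOnes).sum

/-- mismatch count against the alternating pattern; `b` = "a `'1'` is expected here". -/
def pvMs : Bool → List Char → Int
  | _, [] => 0
  | b, c :: cs => (if decide (c = '1') != b then 1 else 0) + pvMs (!b) cs

/-- flips to turn rotation `r` into the alternating pattern that starts with a zero. -/
def pvF1 (cs : List Char) (r : Nat) : Int :=
  pvCnt true (cs.rotate r) + (((cs.length / 2 : Nat) : Int) - pvCnt false (cs.rotate r))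

/-- one `ret`-update of the common reference loop -/
def pvStep (cs : List Char) (ret r : Int) : Int :=
  min (min ret (pvF1 cs r.toNat)) ((cs.length : Int) - pvF1 cs r.toNat)

lemma pvModCast (k : Nat) : PySem.Int.mod (k : Int) 2 = ((k % 2 : Nat) : Int) := by
  rw [PySem.Int.mod_eq_emod_of_pos (by norm_num : (0:Int) < 2)]; omega

lemma pvDivCast (k : Nat) : PySem.Int.floordiv (k : Int) 2 = ((k / 2 : Nat) : Int) := by
  rw [PySem.Int.floordiv_eq_ediv_of_pos (by norm_num : (0:Int) < 2)]; omega

lemma pvCnt_append (xs ys : List Char) :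
    ∀ b, pvCnt b (xs ++ ys) = pvCnt b xs + pvCnt (if xs.length % 2 = 0 then b else !b) ys := by
  induction xs with
  | nil => intro b; simp [pvCnt]
  | cons c xs ih =>
    intro b
    rcases Nat.mod_two_eq_zero_or_one xs.length with h | h <;>
      simp [pvCnt, ih, h, List.length_cons, Nat.succ_mod_two_eq_zero_iff, add_assoc]

lemma pvCnt_add (xs : List Char) : ∀ b, pvCnt b xs + pvCnt (!b) xs = pvTot xs := by
  induction xs with
  | nil => intro b; simp [pvCnt, pvTot]
  | cons c xs ih =>
    intro b
    have := ih (!b)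
    cases b <;> simp [pvCnt, pvTot, List.map_cons] at * <;> omega

lemma pvTot_rotate (cs : List Char) (r : Nat) : pvTot (cs.rotate r) = pvTot cs :=
  ((cs.rotate_perm r).map pvOnes).sum_eq

lemma pvRot_cons (cs : List Char) (r : Nat) (h : r < cs.length) :
    cs.rotate r = cs[r] :: (cs.drop (r+1) ++ cs.take r) := by
  rw [List.rotate_eq_drop_append_take (le_of_lt h)]
  rw [List.drop_eq_getElem_cons h, List.cons_append]

lemma pvRot_succ (cs : List Char) (r : Nat) (h : r < cs.length) :
    cs.rotate (r+1) = (cs.drop (r+1) ++ cs.take r) ++ [cs[r]] := by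
  rw [List.rotate_eq_drop_append_take (by omega)]
  rw [List.take_add_one]
  simp [List.getElem?_eq_getElem h, List.append_assoc]

lemma pvE_succ (cs : List Char) (r : Nat) (hodd : cs.length % 2 = 1) (h : r < cs.length) :
    pvCnt true (cs.rotate (r+1)) = pvCnt false (cs.rotate r) + pvOnes cs[r] := by
  have hl : (cs.drop (r+1) ++ cs.take r).length % 2 = 0 := by
    rw [List.length_append, List.length_drop, List.length_take]; omega
  rw [pvRot_succ cs r h, pvCnt_append, if_pos hl, pvRot_cons cs r h]
  simp [pvCnt]

lemma pvMs_eq (xs : List Char) :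
    pvMs false xs = pvCnt true xs + (((xs.length / 2 : Nat) : Int) - pvCnt false xs)
    ∧ pvMs true xs = pvCnt false xs + ((((xs.length + 1) / 2 : Nat) : Int) - pvCnt true xs) := by
  induction xs with
  | nil => simp [pvMs, pvCnt]
  | cons c xs ih =>
    obtain ⟨h1, h2⟩ := ih
    constructor
    · by_cases hc : c = '1' <;>
        simp [pvMs, pvCnt, pvOnes, hc, h2, List.length_cons] <;> omega
    · by_cases hc : c = '1' <;>
        simp [pvMs, pvCnt, pvOnes, hc, h1, List.length_cons] <;> omega

lemma pvScan (ys : List Char) : ∀ (a t : Int), 0 ≤ a →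
    (PySem.List.pyRange a (a + (ys.length : Int)) 1).foldl
      (fun f i => if decide (PySem.List.pyGetD ys (i - a) ' ' = '1')
                       != decide (PySem.Int.mod i 2 = 1) then f + 1 else f) t
    = t + pvMs (decide (PySem.Int.mod a 2 = 1)) ys := by
  induction ys with
  | nil =>
    intro a t _
    rw [show a + ((List.length ([] : List Char) : Nat) : Int) = a by simp,
        PySem.List.pyRange_one_eq_nil le_rfl]
    simp [pvMs]
  | cons c ys ih =>
    intro a t ha
    rw [PySem.List.pyRange_one_cons (by push_cast [List.length_cons]; omega : a < a + ((c :: ys).length : Int))]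
    simp only [List.foldl_cons, sub_self, PySem.List.pyGetD_zero_cons]
    have hrange : PySem.List.pyRange (a+1) (a + ((c :: ys).length : Int)) 1
        = PySem.List.pyRange (a+1) ((a+1) + (ys.length : Int)) 1 := by
      congr 1; push_cast [List.length_cons]; ring
    rw [hrange]
    rw [PySem.List.foldl_congr_mem _ _
      (fun f i => if decide (PySem.List.pyGetD ys (i - (a+1)) ' ' = '1')
                       != decide (PySem.Int.mod i 2 = 1) then f + 1 else f) _ ?_]
    · rw [ih (a+1) _ (by omega)]
      have hpar : decide (PySem.Int.mod (a+1) 2 = 1) = !decide (PySem.Int.mod a 2 = 1) := by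
        rw [PySem.Int.mod_eq_emod_of_pos (by norm_num : (0:Int) < 2),
            PySem.Int.mod_eq_emod_of_pos (by norm_num : (0:Int) < 2)]
        rcases Int.emod_two_eq a with h | h <;> simp [h] <;> omega
      rw [hpar]
      cases hb : decide (PySem.Int.mod a 2 = 1) <;>
        cases hc : decide (c = '1') <;>
        simp [pvMs, hc] <;> ring
    · intro acc x hx
      rw [PySem.List.mem_pyRange_one] at hx
      have hget : PySem.List.pyGetD (c :: ys) (x - a) ' ' = PySem.List.pyGetD ys (x - (a+1)) ' ' := by
        rw [PySem.List.pyGetD_eq_getElem _ _ (by omega)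
              (by push_cast [List.length_cons] at hx ⊢; omega),
            PySem.List.pyGetD_eq_getElem _ _ (by omega)
              (by omega)]
        have h1 : (x - a).toNat = (x - (a+1)).toNat + 1 := by omega
        simp [h1]
      rw [hget]

lemma pvInner (cs : List Char) (r : Int) (hr : 0 ≤ r) (hrn : r < (cs.length : Int)) :
    solutionBFlips cs (cs.length : Int) r = pvF1 cs r.toNat := by
  unfold solutionBFlips
  have hpos : 0 < cs.length := by omega
  have hlen : (cs.rotate r.toNat).length = cs.length := List.length_rotate ..
  rw [PySem.List.foldl_congr_mem _ _
    (fun f i => if decide (PySem.List.pyGetD (cs.rotate r.toNat) (i - 0) ' ' = '1')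
                     != decide (PySem.Int.mod i 2 = 1) then f + 1 else f) _ ?_]
  · have h := pvScan (cs.rotate r.toNat) 0 0 le_rfl
    rw [hlen] at h
    simp only [zero_add] at h
    rw [h]
    have hd : (decide (PySem.Int.mod (0:Int) 2 = 1)) = false := by decide
    rw [hd]
    have hms := (pvMs_eq (cs.rotate r.toNat)).1
    rw [hlen] at hms
    simpa [pvF1] using hms
  · intro acc x hx
    rw [PySem.List.mem_pyRange_one] at hx
    obtain ⟨hx0, hx1⟩ := hx
    simp only [sub_zero]
    have hxeq : x = ((x.toNat : Nat) : Int) := (Int.toNat_of_nonneg hx0).symm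
    have hreq : r = ((r.toNat : Nat) : Int) := (Int.toNat_of_nonneg hr).symm
    have hmod : PySem.Int.mod (x + r) (cs.length : Int) = (((x.toNat + r.toNat) % cs.length : Nat) : Int) := by
      rw [PySem.Int.mod_eq_emod_of_pos (by exact_mod_cast hpos : (0:Int) < (cs.length : Int))]
      conv_lhs => rw [hxeq, hreq]
      push_cast
      rfl
    rw [hmod, PySem.List.pyGetD_natCast,
        List.getD_eq_getElem _ _ (Nat.mod_lt _ hpos),
        PySem.List.pyGetD_eq_getElem _ _ hx0 (by rw [hlen]; exact_mod_cast hx1),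
        List.getElem_rotate cs r.toNat x.toNat (by rw [hlen]; omega)]

lemma pvEnum (cs : List Char) : ∀ (k : Nat) (oe oo : Int),
    (PySem.List.enumerate cs ((k : Nat) : Int)).foldl
      (fun (st : Int × Int) (p : Int × Char) =>
        if PySem.Int.mod p.1 2 = 0 ∧ p.2 = '1' then (st.1 + 1, st.2)
        else if PySem.Int.mod p.1 2 = 1 ∧ p.2 = '1' then (st.1, st.2 + 1)
        else st) (oe, oo)
    = (oe + pvCnt (decide (k % 2 = 0)) cs, oo + pvCnt (decide (k % 2 = 1)) cs) := by
  induction cs with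
  | nil => intro k oe oo; simp [PySem.List.enumerate, pvCnt]
  | cons c cs ih =>
    intro k oe oo
    rw [PySem.List.enumerate_cons, List.foldl_cons]
    have hcast : ((k : Nat) : Int) + 1 = (((k+1 : Nat)) : Int) := by push_cast; ring
    have hm0 : PySem.Int.mod ((k : Nat) : Int) 2 = 0 ↔ k % 2 = 0 := by rw [pvModCast]; omega
    have hm1 : PySem.Int.mod ((k : Nat) : Int) 2 = 1 ↔ k % 2 = 1 := by rw [pvModCast]; omega
    rcases Nat.mod_two_eq_zero_or_one k with h | h <;> by_cases hc : c = '1'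
    · rw [if_pos ⟨hm0.mpr h, hc⟩, hcast, ih (k+1)]
      have hp : (k+1) % 2 = 1 := by omega
      simp only [h, hp, pvCnt, pvOnes, hc, Prod.mk.injEq]
      norm_num
      ring
    · rw [if_neg (fun hco => hc hco.2), if_neg (fun hco => hc hco.2), hcast, ih (k+1)]
      have hp : (k+1) % 2 = 1 := by omega
      simp only [h, hp, pvCnt, pvOnes, hc, Prod.mk.injEq]
      norm_num
    · rw [if_neg (fun hco => by have := hm0.mp hco.1; omega),
          if_pos ⟨hm1.mpr h, hc⟩, hcast, ih (k+1)]
      have hp : (k+1) % 2 = 0 := by omega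
      simp only [h, hp, pvCnt, pvOnes, hc, Prod.mk.injEq]
      norm_num
      ring
    · rw [if_neg (fun hco => hc hco.2), if_neg (fun hco => hc hco.2), hcast, ih (k+1)]
      have hp : (k+1) % 2 = 0 := by omega
      simp only [h, hp, pvCnt, pvOnes, hc, Prod.mk.injEq]
      norm_num

lemma pvLoopOdd (cs : List Char) (hodd : cs.length % 2 = 1) :
    ∀ (k j : Nat), j + k = cs.length → ∀ ret : Int,
    solutionALoop cs (cs.length : Int) (pvTot cs)
        (PySem.List.pyRange ((j : Nat) : Int) (cs.length : Int) 1) ret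
        (pvCnt true (cs.rotate j)) (pvCnt false (cs.rotate j))
    = (PySem.List.pyRange ((j : Nat) : Int) (cs.length : Int) 1).foldl (pvStep cs) ret := by
  intro k
  induction k with
  | zero =>
    intro j hj ret
    rw [PySem.List.pyRange_one_eq_nil (by omega : (cs.length : Int) ≤ ((j : Nat) : Int))]
    simp [solutionALoop]
  | succ k ih =>
    intro j hj ret
    have hjlt : j < cs.length := by omega
    rw [PySem.List.pyRange_one_cons (by exact_mod_cast hjlt)]
    simp only [solutionALoop, List.foldl_cons]
    rw [pvModCast, pvDivCast]
    have hne : ¬ (((cs.length % 2 : Nat) : Int) = 0) := by omega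
    rw [if_neg hne]
    have hget : PySem.List.pyGetD cs ((j : Nat) : Int) ' ' = cs[j] := by
      rw [PySem.List.pyGetD_natCast, List.getD_eq_getElem _ _ hjlt]
    rw [hget]
    have hE : pvCnt false (cs.rotate j) + (if cs[j] = '1' then (1:Int) else 0)
        = pvCnt true (cs.rotate (j+1)) := by
      rw [pvE_succ cs j hodd hjlt, pvOnes]
    have hO : pvTot cs - pvCnt true (cs.rotate (j+1)) = pvCnt false (cs.rotate (j+1)) := by
      have h1 := pvCnt_add (cs.rotate (j+1)) true
      have h2 := pvTot_rotate cs (j+1)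
      simp only [Bool.not_true] at h1
      omega
    rw [hE, hO]
    have hcast : ((j : Nat) : Int) + 1 = (((j+1 : Nat)) : Int) := by push_cast; ring
    rw [hcast, ih (j+1) (by omega)]
    congr 1
    show min (min ret _) _ = pvStep cs ret ((j : Nat) : Int)
    rw [pvStep]
    have ht : (((j : Nat) : Int)).toNat = j := Int.toNat_natCast j
    rw [ht, pvF1]
    congr 1
    omega

lemma pvLenPos_min (n : Int) (h : 1 ≤ n) : min n 1 = 1 := by omega

/-- common reference value both ports are reduced to -/
def pvRef (cs : List Char) : Int :=
  if cs.length = 0 then (cs.length : Int)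
  else if cs.length % 2 = 1 then
    (PySem.List.pyRange 0 (cs.length : Int) 1).foldl (pvStep cs) (cs.length : Int)
  else pvStep cs (cs.length : Int) 0

lemma pvA (s : String) : solution_1287_5 s = pvRef s.toList := by
  unfold solution_1287_5
  simp only [PySem.Str.len_eq]
  have henum := pvEnum s.toList 0 0 0
  simp only [Nat.cast_zero, zero_add, Nat.zero_mod, decide_true,
    show (decide ((0:Nat) = 1)) = false from rfl] at henum
  rw [henum]
  dsimp only
  have htot : pvCnt true s.toList + pvCnt false s.toList = pvTot s.toList := by
    simpa using pvCnt_add s.toList true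
  have hmod : PySem.Int.mod ((s.toList.length : Nat) : Int) 2 = ((s.toList.length % 2 : Nat) : Int) :=
    pvModCast _
  rcases Nat.eq_zero_or_pos s.toList.length with h0 | hpos
  · rw [pvRef, if_pos h0, h0]
    rw [PySem.List.pyRange_one_eq_nil (by simp)]
    simp [solutionALoop]
  rcases Nat.mod_two_eq_zero_or_one s.toList.length with heven | hodd
  · -- even, nonempty: the loop breaks after its first iteration
    rw [htot]
    rw [PySem.List.pyRange_one_cons (by exact_mod_cast hpos : (0:Int) < ((s.toList.length : Nat) : Int))]
    simp only [solutionALoop]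
    rw [hmod, pvDivCast]
    rw [if_pos (by omega : ((s.toList.length % 2 : Nat) : Int) = 0)]
    rw [pvRef, if_neg (by omega), if_neg (by omega)]
    have hf : pvF1 s.toList ((0:Int)).toNat
        = pvCnt true s.toList + (((s.toList.length / 2 : Nat) : Int) - pvCnt false s.toList) := by
      simp [pvF1, List.rotate_zero]
    rw [pvStep, hf]
    congr 1
    omega
  · -- odd length: full loop
    rw [htot]
    have hloop := pvLoopOdd s.toList hodd s.toList.length 0 (by omega) ((s.toList.length : Nat) : Int)
    simp only [Nat.cast_zero, List.rotate_zero] at hloop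
    rw [hloop, pvRef, if_neg (by omega), if_pos hodd]

lemma pvB (s : String) : solution_1287_5_alt s = pvRef s.toList := by
  unfold solution_1287_5_alt
  simp only [PySem.Str.len_eq]
  have hmod : PySem.Int.mod ((s.toList.length : Nat) : Int) 2 = ((s.toList.length % 2 : Nat) : Int) :=
    pvModCast _
  rcases Nat.eq_zero_or_pos s.toList.length with h0 | hpos
  · rw [pvRef, if_pos h0, h0]
    rw [if_neg (by decide : ¬ PySem.Int.mod (((0:Nat) : Nat) : Int) 2 = 1)]
    rw [show min (((0:Nat):Int)) 1 = ((0:Nat):Int) by simp]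
    rw [PySem.List.pyRange_one_eq_nil (by simp)]
    simp
  rcases Nat.mod_two_eq_zero_or_one s.toList.length with heven | hodd
  · -- even, nonempty: only rotation 0 is evaluated
    rw [if_neg (by rw [hmod]; omega)]
    rw [pvLenPos_min _ (by exact_mod_cast hpos)]
    have h01 : PySem.List.pyRange 0 1 1 = [0] := by decide
    rw [h01]
    simp only [List.foldl_cons, List.foldl_nil]
    rw [pvInner s.toList 0 le_rfl (by exact_mod_cast hpos)]
    rw [pvRef, if_neg (by omega), if_neg (by omega)]
    rfl
  · -- odd length: all rotations
    rw [if_pos (by rw [hmod]; omega)]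
    rw [pvRef, if_neg (by omega), if_pos hodd]
    apply PySem.List.foldl_congr_mem
    intro acc x hx
    rw [PySem.List.mem_pyRange_one] at hx
    rw [pvInner s.toList x hx.1 hx.2]
    rfl

-- ===== VERDICT (by name: the statement is the Claim_ definition above) =====
theorem solution_1287_5_spec : Claim_equal_solution_1287_5 := by
  intro s _
  unfold Spec_solution_1287_5
  rw [pvA, pvB]
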